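-- pv_equiv track=rewrite | github.com/limkeunhyeok/algorithm-study | keunhak/nhn/prob2.py | solution
-- ===== SOURCE A (Python) =====
-- def solution(n, messages):
--     results = []
--     for message in messages:
--         cnt = 0
--         for index in range(0, int(len(message) / 2)):
--             if message[index] != message[len(message) - index - 1]:
--                 cnt += abs(ord(message[index]) - ord(message[len(message) - index - 1]))
--         results.append(cnt)
--
--     return results
-- ===== SOURCE B (Python) =====
-- def solution(n, messages):
--     # Peel the outermost pair off the string repeatedly: add the char-code gap
--     # between the two ends, then shrink to the inner substring s[1:-1].
--     out = []
--     for s in messages: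
--         total = 0
--         while len(s) >= 2:
--             total += abs(ord(s[0]) - ord(s[-1]))
--             s = s[1:-1]
--         out.append(total)
--     return out
-- ===== Notes on version B (the rewrite author's own statement) =====
-- stated objective: alternative
-- what changed: B computes each count by repeatedly peeling the outermost character pair off the string (add |ord(s[0])-ord(s[-1])|, then shrink to s[1:-1]) until fewer than two chars remain, instead of A's indexed half-range loop with an inequality guard; it trades index arithmetic for structural shrinking via slices (O(len^2) per message from slicing).
import Mathlib
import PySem

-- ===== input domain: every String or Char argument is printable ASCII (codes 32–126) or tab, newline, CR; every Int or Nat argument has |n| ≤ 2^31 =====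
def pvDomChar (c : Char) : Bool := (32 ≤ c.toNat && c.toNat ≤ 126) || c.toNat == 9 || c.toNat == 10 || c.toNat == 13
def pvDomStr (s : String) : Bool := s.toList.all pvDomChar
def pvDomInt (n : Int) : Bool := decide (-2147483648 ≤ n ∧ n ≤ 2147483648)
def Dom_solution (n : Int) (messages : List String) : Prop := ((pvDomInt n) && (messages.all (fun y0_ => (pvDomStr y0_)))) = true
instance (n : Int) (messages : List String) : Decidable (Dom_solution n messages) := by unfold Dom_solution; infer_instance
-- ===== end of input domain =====

-- B peels the outermost character pair off each string repeatedly (alternative decomposition, not faster).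

-- ===== PORT A =====
-- ord(message[i]) as an Int; indices used by both programs are always in range.
def pvOrdAt (cs : List Char) (i : Nat) : Int := ((cs.getD i ' ').toNat : Int)

def solution (n : Int) (messages : List String) : List Int :=
  messages.foldl
    (fun results message =>
      let cs := message.toList
      let cnt :=
        (List.range (cs.length / 2)).foldl
          (fun cnt index =>
            if cs.getD index ' ' ≠ cs.getD (cs.length - index - 1) ' ' then
              cnt + |pvOrdAt cs index - pvOrdAt cs (cs.length - index - 1)|
            else cnt)
          0
      results ++ [cnt])
    []

-- ===== PORT B =====
-- the slice s[1:-1] shrinks a string of length ≥ 2 (termination of the while loop)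
lemma pvSlice_len_lt (cs : List Char) (h : 2 ≤ cs.length) :
    (PySem.List.slice cs (some 1) (some (-1))).length < cs.length := by
  have h1 : ((1 : Int) : Int) = ((1 : Nat) : Int) := by norm_num
  rw [PySem.List.length_slice]
  have hb : PySem.List.clampIdx cs.length (-1) = cs.length - 1 :=
    PySem.List.clampIdx_neg_one cs.length
  have ha : PySem.List.clampIdx cs.length 1 = min 1 cs.length := by
    rw [h1, PySem.List.clampIdx_natCast]
  omega

-- while len(s) >= 2: total += abs(ord(s[0]) - ord(s[-1])); s = s[1:-1]
def pvPeel (cs : List Char) (total : Int) : Int :=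
  if h : 2 ≤ cs.length then
    pvPeel (PySem.List.slice cs (some 1) (some (-1)))
      (total + |pvOrdAt cs 0 - pvOrdAt cs (cs.length - 1)|)
  else total
termination_by cs.length
decreasing_by exact pvSlice_len_lt cs h

def solution_alt (n : Int) (messages : List String) : List Int :=
  messages.foldl (fun out s => out ++ [pvPeel s.toList 0]) []

-- ===== PRECONDITION & SPEC =====
def Spec_solution (n : Int) (messages : List String) (out : List Int) : Prop := out = solution_alt n messages
instance (n : Int) (messages : List String) (out : List Int) : Decidable (Spec_solution n messages out) := by unfold Spec_solution; infer_instance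

-- ===== CLAIM (what is proved, stated in full; the proofs are below) =====
def Claim_equal_solution : Prop := ∀ (n : Int) (messages : List String), Dom_solution n messages → Spec_solution n messages (solution n messages)

-- ===== LEMMAS AND PROOFS =====
-- the mirror difference at index i
def pvF (cs : List Char) (i : Nat) : Int := |pvOrdAt cs i - pvOrdAt cs (cs.length - 1 - i)|

lemma foldl_add_eq_sum (f : Nat → Int) (k : Nat) :
    (List.range k).foldl (fun t i => t + f i) 0 = ∑ i ∈ Finset.range k, f i := by
  induction k with
  | zero => simp
  | succ k ih => rw [List.range_succ, List.foldl_append, Finset.sum_range_succ, ih]; simp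

lemma a_inner_eq_sum (cs : List Char) :
    (List.range (cs.length / 2)).foldl
      (fun cnt index =>
        if cs.getD index ' ' ≠ cs.getD (cs.length - index - 1) ' ' then
          cnt + |pvOrdAt cs index - pvOrdAt cs (cs.length - index - 1)|
        else cnt)
      0 = ∑ i ∈ Finset.range (cs.length / 2), pvF cs i := by
  have hstep : (fun (cnt : Int) (index : Nat) =>
      if cs.getD index ' ' ≠ cs.getD (cs.length - index - 1) ' ' then
        cnt + |pvOrdAt cs index - pvOrdAt cs (cs.length - index - 1)|
      else cnt) = fun (cnt : Int) (i : Nat) => cnt + pvF cs i := by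
    funext cnt i
    have h' : cs.length - i - 1 = cs.length - 1 - i := by omega
    rw [h']
    by_cases h : cs.getD i ' ' = cs.getD (cs.length - 1 - i) ' '
    · simp only [List.getD] at h
      simp [pvF, pvOrdAt, h]
    · simp only [List.getD] at h
      simp [pvF, pvOrdAt, h]
  rw [hstep, foldl_add_eq_sum]

-- s[1:-1] as drop/take
lemma pvSlice_eq (cs : List Char) :
    PySem.List.slice cs (some 1) (some (-1)) = (cs.drop 1).take (cs.length - 2) := by
  by_cases h : cs = []
  · simp [PySem.List.slice, PySem.List.clampIdx, h]
  · have hl : 1 ≤ cs.length := List.length_pos_of_ne_nil h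
    have ht : ((cs.length : Int) + (-1)).toNat = cs.length - 1 := by omega
    simp [PySem.List.slice, PySem.List.clampIdx, h, ht, Nat.min_eq_left hl, List.drop_one]
    omega

lemma pvOrdAt_inner (cs : List Char) (i : Nat) (hi : i + 2 ≤ cs.length) (h1 : 1 ≤ i) :
    pvOrdAt ((cs.drop 1).take (cs.length - 2)) (i - 1) = pvOrdAt cs i := by
  unfold pvOrdAt
  congr 2
  rw [List.getD_eq_getElem?_getD, List.getD_eq_getElem?_getD,
      List.getElem?_take_of_lt (by omega), List.getElem?_drop]
  have h' : 1 + (i - 1) = i := by omega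
  rw [h']

lemma pvF_inner (cs : List Char) (i : Nat) (h2 : 2 ≤ cs.length)
    (hi : i < (cs.length - 2)) :
    pvF ((cs.drop 1).take (cs.length - 2)) i = pvF cs (i + 1) := by
  have hlen : ((cs.drop 1).take (cs.length - 2)).length = cs.length - 2 := by
    simp; omega
  unfold pvF
  rw [hlen]
  have e1 : pvOrdAt ((cs.drop 1).take (cs.length - 2)) i = pvOrdAt cs (i + 1) := by
    have := pvOrdAt_inner cs (i + 1) (by omega) (by omega)
    simpa using this
  have e2 : pvOrdAt ((cs.drop 1).take (cs.length - 2)) (cs.length - 2 - 1 - i)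
      = pvOrdAt cs (cs.length - 2 - i) := by
    have := pvOrdAt_inner cs (cs.length - 2 - i) (by omega) (by omega)
    have harith : cs.length - 2 - i - 1 = cs.length - 2 - 1 - i := by omega
    rw [harith] at this
    exact this
  rw [e1, e2]
  have harith2 : cs.length - 2 - i = cs.length - 1 - (i + 1) := by omega
  rw [harith2]

-- the peel loop computes the half-range mirror sum
lemma pvPeel_eq_sum (cs : List Char) (t : Int) :
    pvPeel cs t = t + ∑ i ∈ Finset.range (cs.length / 2), pvF cs i := by
  induction hn : cs.length using Nat.strong_induction_on generalizing cs t with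
  | _ m ih =>
    subst hn
    rw [pvPeel]
    by_cases h : 2 ≤ cs.length
    · rw [dif_pos h]
      have hlt := pvSlice_len_lt cs h
      rw [ih _ hlt _ _ rfl]
      rw [pvSlice_eq]
      have hlen : ((cs.drop 1).take (cs.length - 2)).length = cs.length - 2 := by
        simp; omega
      have hsum : ∑ i ∈ Finset.range (((cs.drop 1).take (cs.length - 2)).length / 2),
          pvF ((cs.drop 1).take (cs.length - 2)) i
          = ∑ i ∈ Finset.range ((cs.length - 2) / 2), pvF cs (i + 1) := by
        rw [hlen]
        apply Finset.sum_congr rfl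
        intro i hi
        exact pvF_inner cs i h (by have := Finset.mem_range.mp hi; omega)
      rw [hsum]
      have hhalf : cs.length / 2 = (cs.length - 2) / 2 + 1 := by omega
      rw [hhalf, Finset.sum_range_succ']
      have h0 : pvF cs 0 = |pvOrdAt cs 0 - pvOrdAt cs (cs.length - 1)| := by
        unfold pvF; norm_num
      rw [h0]
      ring
    · rw [dif_neg h]
      have : cs.length / 2 = 0 := by omega
      rw [this]
      simp

lemma foldl_append_eq_map (g : String → Int) (l : List String) (acc : List Int) :
    l.foldl (fun r m => r ++ [g m]) acc = acc ++ l.map g := by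
  induction l generalizing acc with
  | nil => simp
  | cons x xs ih => simp [ih]

-- ===== VERDICT (by name: the statement is the Claim_ definition above) =====
theorem solution_spec : Claim_equal_solution := by
  intro n messages _
  unfold Spec_solution solution solution_alt
  rw [foldl_append_eq_map (fun message =>
    (List.range (message.toList.length / 2)).foldl
      (fun cnt index =>
        if message.toList.getD index ' ' ≠ message.toList.getD (message.toList.length - index - 1) ' ' then
          cnt + |pvOrdAt message.toList index - pvOrdAt message.toList (message.toList.length - index - 1)|
        else cnt) 0),
    foldl_append_eq_map (fun s => pvPeel s.toList 0)]
  simp only [List.nil_append]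
  apply List.map_congr_left
  intro s _
  rw [a_inner_eq_sum, pvPeel_eq_sum]
  simp
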